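-- pv_equiv track=rewrite | github.com/yeoeol/Algo_Python | programmers/rough_and_ready_keyboard.py | solution
-- ===== SOURCE A (Python) =====
-- from collections import defaultdict
--
-- def solution(keymap, targets):
--     answer = []
--     d = defaultdict(int)
--
--     for key in keymap:
--         for i, n in enumerate(key):
--             d[n] = i+1 if d[n] == 0 else min(d[n], i+1)
--
--     for target in targets:
--         summ = 0
--         for t in target:
--             if d[t] == 0:
--                 summ = -1
--                 break
--             summ += d[t]
--         answer.append(summ)
--
--     return answer
-- ===== SOURCE B (Python) =====
-- def solution(keymap, targets):
--     answer = []
--     for target in targets: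
--         total = 0
--         for t in target:
--             positions = [k.find(t) + 1 for k in keymap if t in k]
--             if not positions:
--                 total = -1
--                 break
--             total += min(positions)
--         answer.append(total)
--     return answer
-- ===== Notes on version B (the rewrite author's own statement) =====
-- stated objective: simpler
-- what changed: B removes A's precomputed char-to-min-position dict entirely and instead, for each target character, scans the keymaps on demand, taking the minimum of k.find(t)+1 over the keymaps containing t (-1 if none).
import Mathlib
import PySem

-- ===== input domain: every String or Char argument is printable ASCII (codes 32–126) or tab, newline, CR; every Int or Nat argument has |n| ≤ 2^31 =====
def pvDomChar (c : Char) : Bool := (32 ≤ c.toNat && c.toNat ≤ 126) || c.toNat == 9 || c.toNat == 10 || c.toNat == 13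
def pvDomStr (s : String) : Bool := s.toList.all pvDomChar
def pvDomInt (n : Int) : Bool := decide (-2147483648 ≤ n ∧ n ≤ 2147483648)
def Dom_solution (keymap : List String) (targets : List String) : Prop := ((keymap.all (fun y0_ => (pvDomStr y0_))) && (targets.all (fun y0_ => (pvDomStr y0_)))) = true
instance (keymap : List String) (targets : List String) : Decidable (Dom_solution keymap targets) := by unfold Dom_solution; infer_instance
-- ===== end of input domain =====

-- B drops A's precomputed char→min-position dict and instead scans the keymaps on demand
-- per target character (objective: simpler); same return value on every input.

-- ===== PORT A =====
-- inner loop body: d[n] = i+1 if d[n] == 0 else min(d[n], i+1)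
def pvUpd (d : PySem.Dict Char Int) (p : Int × Char) : PySem.Dict Char Int :=
  d.insert p.2 (if d.getD p.2 0 = 0 then p.1 + 1 else min (d.getD p.2 0) (p.1 + 1))

-- for key in keymap: for i, n in enumerate(key): …
def pvBuild (keymap : List String) : PySem.Dict Char Int :=
  keymap.foldl (fun d key => (PySem.List.enumerate key.toList 0).foldl pvUpd d) PySem.Dict.empty

-- for t in target: if d[t] == 0: summ = -1; break; summ += d[t]   (break = stop recursing)
def pvSumA (d : PySem.Dict Char Int) : List Char → Int → Int
  | [], summ => summ
  | t :: ts, summ => if d.getD t 0 = 0 then -1 else pvSumA d ts (summ + d.getD t 0)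

def solution (keymap : List String) (targets : List String) : List Int :=
  let d := pvBuild keymap
  targets.foldl (fun answer target => answer ++ [pvSumA d target.toList 0]) []

-- ===== PORT B =====
-- positions = [k.find(t) + 1 for k in keymap if t in k]
def pvPositions (keymap : List String) (t : Char) : List Int :=
  (keymap.filter (fun k => PySem.Str.isIn (String.ofList [t]) k)).map
    (fun k => PySem.Str.find k (String.ofList [t]) + 1)

-- for t in target: if not positions: total = -1; break; total += min(positions)
def pvSumB (keymap : List String) : List Char → Int → Int
  | [], total => total
  | t :: ts, total =>
    match PySem.List.min? (pvPositions keymap t) (fun x => x) with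
    | none => -1
    | some m => pvSumB keymap ts (total + m)

def solution_alt (keymap : List String) (targets : List String) : List Int :=
  targets.foldl (fun answer target => answer ++ [pvSumB keymap target.toList 0]) []

-- ===== PRECONDITION & SPEC =====
def Spec_solution (keymap : List String) (targets : List String) (out : List Int) : Prop := out = solution_alt keymap targets
instance (keymap : List String) (targets : List String) (out : List Int) : Decidable (Spec_solution keymap targets out) := by unfold Spec_solution; infer_instance

-- ===== CLAIM (what is proved, stated in full; the proofs are below) =====
def Claim_equal_solution : Prop := ∀ (keymap : List String) (targets : List String), Dom_solution keymap targets → Spec_solution keymap targets (solution keymap targets)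

-- ===== LEMMAS AND PROOFS =====

-- a singleton is a prefix iff it is the head
theorem pv_singleton_prefix (c : Char) (l : List Char) : [c] <+: l ↔ ∃ t, l = c :: t := by
  cases l with
  | nil => simp
  | cons x t => simp [List.cons_prefix_cons, eq_comm]

-- elements strictly before idxOf are different from c
theorem pv_getElem_ne_of_lt_idxOf (l : List Char) (c : Char) :
    ∀ (i : Nat) (hi : i < l.length), i < l.idxOf c → l[i] ≠ c := by
  induction l with
  | nil => intro i hi; simp at hi
  | cons x t ih =>
    intro i hi h
    rw [List.idxOf_cons] at h
    by_cases hx : x = c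
    · subst hx
      simp at h
    · have hbeq : (x == c) = false := by simpa using hx
      rw [hbeq] at h
      simp only [cond_false] at h
      cases i with
      | zero => simpa using hx
      | succ j => exact ih j (by simpa using hi) (by omega)

-- str.find with a single character is the first index of that character (or -1)
theorem pv_find_singleton (l : List Char) (c : Char) :
    PySem.Chars.find l [c] = if c ∈ l then (l.idxOf c : Int) else -1 := by
  by_cases hc : c ∈ l
  · have hinf : [c] <:+: l := (List.singleton_infix_iff c l).2 hc
    have h0 : 0 ≤ PySem.Chars.find l [c] := (PySem.Chars.find_nonneg_iff l [c]).2 hinf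
    obtain ⟨hpre, hmin⟩ := PySem.Chars.find_spec h0
    set n := (PySem.Chars.find l [c]).toNat with hn
    obtain ⟨t, ht⟩ := (pv_singleton_prefix c (l.drop n)).1 hpre
    have hnlen : n < l.length := by
      by_contra h
      rw [List.drop_eq_nil_of_le (by omega)] at ht
      simp at ht
    rw [List.drop_eq_getElem_cons hnlen] at ht
    injection ht with hgot _
    have hidx : l.idxOf c < l.length := List.idxOf_lt_length_iff.2 hc
    have hle : ¬ (l.idxOf c < n) := by
      intro hlt
      apply hmin _ hlt
      rw [pv_singleton_prefix, List.drop_eq_getElem_cons hidx, List.getElem_idxOf hidx]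
      exact ⟨_, rfl⟩
    have hge : ¬ (n < l.idxOf c) := fun hlt => pv_getElem_ne_of_lt_idxOf l c n hnlen hlt hgot
    have : n = l.idxOf c := by omega
    simp only [hc, if_true]
    omega
  · rw [(PySem.Chars.find_eq_neg_one_iff l [c]).2 (by
      rw [List.singleton_infix_iff]; exact hc)]
    simp [hc]

-- the per-key combining step seen at one character c
def pvG (c : Char) (v : Int) (k : String) : Int :=
  if c ∈ k.toList then
    (if v = 0 then (k.toList.idxOf c : Int) + 1 else min v ((k.toList.idxOf c : Int) + 1))
  else v

-- effect of A's inner enumerate-loop over one key on each entry of the dict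
theorem pv_inner (l : List Char) : ∀ (s : Nat) (d : PySem.Dict Char Int),
    (∀ x, 0 ≤ d.getD x 0) →
    (∀ x, 0 ≤ ((PySem.List.enumerate l (s : Int)).foldl pvUpd d).getD x 0) ∧
    (∀ c, ((PySem.List.enumerate l (s : Int)).foldl pvUpd d).getD c 0 =
      if c ∈ l then
        (if d.getD c 0 = 0 then (s : Int) + (l.idxOf c : Int) + 1
         else min (d.getD c 0) ((s : Int) + (l.idxOf c : Int) + 1))
      else d.getD c 0) := by
  induction l with
  | nil => intro s d hd; simp [PySem.List.enumerate_nil, hd]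
  | cons x t ih =>
    intro s d hd
    rw [PySem.List.enumerate_cons, List.foldl_cons]
    have hstep : ∀ c, (pvUpd d ((s : Int), x)).getD c 0 =
        if c = x then (if d.getD x 0 = 0 then (s : Int) + 1 else min (d.getD x 0) ((s : Int) + 1))
        else d.getD c 0 := by
      intro c
      simp only [pvUpd, PySem.Dict.getD_insert]
    have hd1 : ∀ c, 0 ≤ (pvUpd d ((s : Int), x)).getD c 0 := by
      intro c
      rw [hstep c]
      have := hd c; have := hd x
      split_ifs <;> simp_all <;> omega
    have hcast : ((s : Int) + 1) = ((s + 1 : Nat) : Int) := by push_cast; ring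
    rw [hcast]
    obtain ⟨ihn, ihv⟩ := ih (s + 1) (pvUpd d ((s : Int), x)) hd1
    refine ⟨ihn, ?_⟩
    intro c
    rw [ihv c, hstep c]
    by_cases hcx : c = x
    · subst hcx
      by_cases hct : c ∈ t
      · have hidx1 : (t.idxOf c : Int) ≥ 0 := by positivity
        have := hd c
        simp only [List.mem_cons, true_or, if_true, List.idxOf_cons, beq_self_eq_true, cond_true,
          hct, Nat.cast_zero]
        push_cast
        split_ifs <;> omega
      · have := hd c
        simp only [hct, if_false, List.mem_cons, true_or, if_true, List.idxOf_cons,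
          beq_self_eq_true, cond_true, Nat.cast_zero]
        split_ifs <;> omega
    · have hbeq : (x == c) = false := by simpa using (fun h => hcx h.symm)
      by_cases hct : c ∈ t
      · simp only [hcx, if_false, hct, if_true, List.mem_cons, or_true, List.idxOf_cons, hbeq,
          cond_false]
        push_cast
        split_ifs <;> omega
      · simp [hcx, hct]

-- effect of A's whole build loop on one entry: a left fold of pvG over the keymaps
theorem pv_outer (ks : List String) : ∀ (d : PySem.Dict Char Int),
    (∀ x, 0 ≤ d.getD x 0) →
    (∀ x, 0 ≤ (ks.foldl (fun d key => (PySem.List.enumerate key.toList 0).foldl pvUpd d) d).getD x 0) ∧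
    (∀ c, (ks.foldl (fun d key => (PySem.List.enumerate key.toList 0).foldl pvUpd d) d).getD c 0 =
      ks.foldl (pvG c) (d.getD c 0)) := by
  induction ks with
  | nil => intro d hd; exact ⟨hd, fun c => rfl⟩
  | cons k t ih =>
    intro d hd
    have h0 : ((0 : Nat) : Int) = (0 : Int) := rfl
    obtain ⟨hn, hv⟩ := pv_inner k.toList 0 d hd
    rw [h0] at hn hv
    obtain ⟨ihn, ihv⟩ := ih _ hn
    refine ⟨ihn, fun c => ?_⟩
    rw [List.foldl_cons, List.foldl_cons, ihv c, hv c]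
    congr 1
    simp only [pvG]
    split_ifs <;> ring_nf

-- B's position list, rewritten through pv_find_singleton
theorem pv_positions_cons (k : String) (ks : List String) (c : Char) :
    pvPositions (k :: ks) c =
      if c ∈ k.toList then ((k.toList.idxOf c : Int) + 1) :: pvPositions ks c
      else pvPositions ks c := by
  by_cases hc : c ∈ k.toList
  · have hin : PySem.Chars.isIn [c] k.toList = true := by
      rw [PySem.Chars.isIn_iff_infix, List.singleton_infix_iff]
      exact hc
    simp [pvPositions, PySem.Str.isIn_eq, PySem.Str.find_eq,
      String.toList_ofList, hin, pv_find_singleton, hc]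
  · have hin : PySem.Chars.isIn [c] k.toList = false := by
      rw [PySem.Chars.isIn_eq_false_iff, List.singleton_infix_iff]
      exact hc
    simp [pvPositions, PySem.Str.isIn_eq, String.toList_ofList, hin, hc]

theorem pv_positions_ge_one (ks : List String) (c : Char) :
    ∀ m ∈ pvPositions ks c, 1 ≤ m := by
  induction ks with
  | nil => intro m hm; simp [pvPositions] at hm
  | cons k t ih =>
    intro m hm
    rw [pv_positions_cons] at hm
    by_cases hc : c ∈ k.toList
    · rw [if_pos hc] at hm
      rcases List.mem_cons.1 hm with h | h
      · subst h; omega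
      · exact ih m h
    · rw [if_neg hc] at hm; exact ih m hm

-- fold of pvG from a positive seed is a running min over the position list
theorem pv_fold_min (c : Char) (ks : List String) : ∀ (v : Int), 1 ≤ v →
    ks.foldl (pvG c) v = (pvPositions ks c).foldl min v := by
  induction ks with
  | nil => intro v hv; simp [pvPositions]
  | cons k t ih =>
    intro v hv
    rw [List.foldl_cons, pv_positions_cons]
    by_cases hc : c ∈ k.toList
    · have hidx : (0 : Int) ≤ (k.toList.idxOf c : Int) := by positivity
      have hg : pvG c v k = min v ((k.toList.idxOf c : Int) + 1) := by
        simp only [pvG, hc, if_true]; split_ifs <;> omega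
      rw [if_pos hc, List.foldl_cons, hg, ih _ (by omega)]
    · have hg : pvG c v k = v := by simp [pvG, hc]
      rw [if_neg hc, hg, ih _ hv]

-- fold of pvG from 0 computes min(positions) (or 0 if there are none)
theorem pv_fold_zero (c : Char) (ks : List String) :
    ks.foldl (pvG c) 0 =
      match PySem.List.min? (pvPositions ks c) (fun x => x) with
      | none => 0
      | some m => m := by
  induction ks with
  | nil => simp [pvPositions, PySem.List.min?]
  | cons k t ih =>
    rw [List.foldl_cons]
    by_cases hc : c ∈ k.toList
    · have hidx : (0 : Int) ≤ (k.toList.idxOf c : Int) := by positivity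
      have hg : pvG c 0 k = (k.toList.idxOf c : Int) + 1 := by simp [pvG, hc]
      rw [hg, pv_fold_min c t _ (by omega), pv_positions_cons, if_pos hc,
        PySem.List.min?_id_cons]
    · have hg : pvG c 0 k = 0 := by simp [pvG, hc]
      rw [hg, ih, pv_positions_cons, if_neg hc]

-- the dict entry A reads for a character equals min over B's positions (0 if absent)
theorem pv_dval (keymap : List String) (c : Char) :
    (pvBuild keymap).getD c 0 =
      match PySem.List.min? (pvPositions keymap c) (fun x => x) with
      | none => 0
      | some m => m := by
  have hd : ∀ x, 0 ≤ (PySem.Dict.empty : PySem.Dict Char Int).getD x 0 := by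
    intro x; simp [pysem]
  obtain ⟨_, hv⟩ := pv_outer keymap PySem.Dict.empty hd
  rw [pvBuild, hv c]
  have : (PySem.Dict.empty : PySem.Dict Char Int).getD c 0 = 0 := by simp [pysem]
  rw [this, pv_fold_zero]

theorem pv_sum_eq (keymap : List String) (ts : List Char) : ∀ (summ : Int),
    pvSumA (pvBuild keymap) ts summ = pvSumB keymap ts summ := by
  induction ts with
  | nil => intro summ; rfl
  | cons t rest ih =>
    intro summ
    rw [pvSumA, pvSumB]
    cases h : PySem.List.min? (pvPositions keymap t) (fun x => x) with
    | none =>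
      have : (pvBuild keymap).getD t 0 = 0 := by rw [pv_dval, h]
      simp [this]
    | some m =>
      have hm : (pvBuild keymap).getD t 0 = m := by rw [pv_dval, h]
      have hm1 : 1 ≤ m := pv_positions_ge_one keymap t m (PySem.List.min?_mem h)
      rw [hm, if_neg (by omega), ih]

-- ===== VERDICT (by name: the statement is the Claim_ definition above) =====
theorem solution_spec : Claim_equal_solution := by
  intro keymap targets _
  unfold Spec_solution solution solution_alt
  simp only [pv_sum_eq]
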